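-- pv_equiv track=rewrite | github.com/goaziz/leetcode | Medium/max_nesting_depth_vps_1111.py | maxDepthAfterSplit
-- ===== SOURCE A (Python) =====
-- from typing import List
--
-- def maxDepthAfterSplit(seq: str) -> List[int]:
--     depth = 0
--     ans = []
--
--     for s in seq:
--         if s == '(':
--             ans.append(depth % 2)
--             depth += 1
--         else:
--             depth -= 1
--             ans.append(depth % 2)
--
--     return ans
-- ===== SOURCE B (Python) =====
-- from typing import List
--
-- def maxDepthAfterSplit(seq: str) -> List[int]:
--     # Depth is never needed: every character flips depth parity (+1/-1 are equal
--     # mod 2), so depth-before at index i has parity i % 2. Hence the label is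
--     # i % 2 for '(' and (i + 1) % 2 otherwise — pure index arithmetic, no state.
--     return [(i + (c != '(')) % 2 for i, c in enumerate(seq)]
-- ===== Notes on version B (the rewrite author's own statement) =====
-- stated objective: simpler
-- what changed: Eliminates the running depth counter entirely: since every character flips depth parity, the label is computed by closed-form index arithmetic, (i + (c != '(')) % 2 over enumerate(seq), instead of maintaining and mutating depth state.
import Mathlib
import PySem

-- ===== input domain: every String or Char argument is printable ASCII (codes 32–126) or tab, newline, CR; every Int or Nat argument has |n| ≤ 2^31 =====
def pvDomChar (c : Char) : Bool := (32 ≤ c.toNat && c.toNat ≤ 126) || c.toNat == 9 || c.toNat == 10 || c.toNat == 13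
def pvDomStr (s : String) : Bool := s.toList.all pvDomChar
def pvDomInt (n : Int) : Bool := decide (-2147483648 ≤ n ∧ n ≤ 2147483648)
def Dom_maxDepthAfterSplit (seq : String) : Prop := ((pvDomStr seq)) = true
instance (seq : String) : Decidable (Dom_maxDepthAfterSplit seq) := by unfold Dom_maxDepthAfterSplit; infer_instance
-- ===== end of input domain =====

-- B drops A's running depth counter entirely: every character flips depth parity, so the
-- label is pure index arithmetic, (i + (c != '(')) % 2 (objective: simpler, same cost).

-- ===== PORT A =====
def maxDepthAfterSplit (seq : String) : List Int :=
  (seq.toList.foldl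
    (fun (st : Int × List Int) s =>
      if s = '(' then (st.1 + 1, st.2 ++ [PySem.Int.mod st.1 2])
      else (st.1 - 1, st.2 ++ [PySem.Int.mod (st.1 - 1) 2]))
    ((0 : Int), ([] : List Int))).2

-- ===== PORT B =====
def maxDepthAfterSplit_alt (seq : String) : List Int :=
  (PySem.List.enumerate seq.toList 0).map
    (fun p => PySem.Int.mod (p.1 + (if p.2 ≠ '(' then 1 else 0)) 2)

-- ===== PRECONDITION & SPEC =====
def Spec_maxDepthAfterSplit (seq : String) (out : List Int) : Prop := out = maxDepthAfterSplit_alt seq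
instance (seq : String) (out : List Int) : Decidable (Spec_maxDepthAfterSplit seq out) := by unfold Spec_maxDepthAfterSplit; infer_instance

-- ===== CLAIM (what is proved, stated in full; the proofs are below) =====
def Claim_equal_maxDepthAfterSplit : Prop := ∀ (seq : String), Dom_maxDepthAfterSplit seq → Spec_maxDepthAfterSplit seq (maxDepthAfterSplit seq)

-- ===== LEMMAS AND PROOFS =====
-- parity of the running depth equals parity of the index, regardless of which branch fires
theorem pv_mod2_succ (d k : Int) (h : PySem.Int.mod d 2 = PySem.Int.mod k 2) :
    PySem.Int.mod (d + 1) 2 = PySem.Int.mod (k + 1) 2 := by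
  simp only [PySem.Int.mod, Int.fmod_eq_emod] at *
  omega

theorem pv_mod2_pred (d k : Int) (h : PySem.Int.mod d 2 = PySem.Int.mod k 2) :
    PySem.Int.mod (d - 1) 2 = PySem.Int.mod (k + 1) 2 := by
  simp only [PySem.Int.mod, Int.fmod_eq_emod] at *
  omega

theorem pv_loop_eq (cs : List Char) : ∀ (d k : Int) (ans : List Int),
    PySem.Int.mod d 2 = PySem.Int.mod k 2 →
    (cs.foldl
      (fun (st : Int × List Int) s =>
        if s = '(' then (st.1 + 1, st.2 ++ [PySem.Int.mod st.1 2])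
        else (st.1 - 1, st.2 ++ [PySem.Int.mod (st.1 - 1) 2]))
      (d, ans)).2
    = ans ++ (PySem.List.enumerate cs k).map
        (fun p => PySem.Int.mod (p.1 + (if p.2 ≠ '(' then 1 else 0)) 2) := by
  induction cs with
  | nil => intro d k ans _; simp [PySem.List.enumerate_nil]
  | cons c cs ih =>
    intro d k ans h
    rw [PySem.List.enumerate_cons]
    by_cases hc : c = '('
    · subst hc
      rw [List.foldl_cons, if_pos rfl, ih (d + 1) (k + 1) _ (pv_mod2_succ d k h)]
      have h' : d % 2 = k % 2 := by
        simp only [PySem.Int.mod, Int.fmod_eq_emod] at h; omega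
      simp [List.append_assoc, h']
    · rw [List.foldl_cons, if_neg hc, ih (d - 1) (k + 1) _ (pv_mod2_pred d k h),
        pv_mod2_pred d k h]
      simp [List.append_assoc, hc]

-- ===== VERDICT (by name: the statement is the Claim_ definition above) =====
theorem maxDepthAfterSplit_spec : Claim_equal_maxDepthAfterSplit := by
  intro seq _
  show maxDepthAfterSplit seq = maxDepthAfterSplit_alt seq
  unfold maxDepthAfterSplit maxDepthAfterSplit_alt
  simpa using pv_loop_eq seq.toList 0 0 [] rfl
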